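-- pv_equiv track=rewrite | github.com/veenx0704/cecs-427 | Assignment 4/market_strategy.py | highest_valuations
-- ===== SOURCE A (Python) =====
-- def highest_valuations(updated_valuations):
--     connections = {}
--     for (u, v), valuation in updated_valuations.items():
--         if v not in connections or valuation > connections[v][1]:
--             connections[v] = (u, valuation)
--         elif valuation == connections[v][1]:  # Handle ties
--             connections[v] = (u, valuation)  # Simplified handling; expand for more complex tie logic if needed
--     return connections
-- ===== SOURCE B (Python) =====
-- def highest_valuations(updated_valuations):
--     # Two-pass pipeline: group each buyer's (seller, valuation) entries in
--     # encounter order, then reduce each group to its last maximal entry.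
--     groups = {}
--     for (u, v), valuation in updated_valuations.items():
--         groups.setdefault(v, []).append((u, valuation))
--     result = {}
--     for v, pairs in groups.items():
--         best = pairs[0]
--         for p in pairs[1:]:
--             if best[1] <= p[1]:
--                 best = p
--         result[v] = best
--     return result
-- ===== Notes on version B (the rewrite author's own statement) =====
-- stated objective: alternative
-- what changed: Replaces A's single pass that maintains a running best per buyer inside the scan with a two-pass pipeline: first group every (seller, valuation) entry under its buyer in encounter order, then reduce each group to its last maximal entry.
import Mathlib
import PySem

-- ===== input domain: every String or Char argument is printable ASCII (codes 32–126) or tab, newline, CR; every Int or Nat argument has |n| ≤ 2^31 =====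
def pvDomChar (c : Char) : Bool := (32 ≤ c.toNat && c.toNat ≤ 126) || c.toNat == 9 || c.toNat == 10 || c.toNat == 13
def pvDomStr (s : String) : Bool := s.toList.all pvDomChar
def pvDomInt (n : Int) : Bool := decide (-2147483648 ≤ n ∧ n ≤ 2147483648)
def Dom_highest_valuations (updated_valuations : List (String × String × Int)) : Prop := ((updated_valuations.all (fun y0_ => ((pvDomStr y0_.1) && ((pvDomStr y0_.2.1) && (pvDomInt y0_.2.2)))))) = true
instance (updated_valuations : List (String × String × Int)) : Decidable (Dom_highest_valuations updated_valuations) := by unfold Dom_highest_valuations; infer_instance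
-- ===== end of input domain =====

-- B replaces A's single running-best pass with a group-then-reduce two-pass pipeline (alternative decomposition, same cost).


-- ===== PORT A =====
-- A's loop body: connections is keyed by buyer v; replace on strictly greater valuation, and also on ties.
def hvStepA (c : PySem.Dict String (String × Int)) (x : (String × String) × Int) :
    PySem.Dict String (String × Int) :=
  match c.get? x.1.2 with
  | none => c.insert x.1.2 (x.1.1, x.2)
  | some p =>
      if x.2 > p.2 then c.insert x.1.2 (x.1.1, x.2)
      else if x.2 == p.2 then c.insert x.1.2 (x.1.1, x.2)
      else c

-- the dict parameter arrives as its item list; PySem.Dict.ofList is dict(pairs)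
def highest_valuations (updated_valuations : List (String × String × Int)) : List (String × String × Int) :=
  ((PySem.Dict.ofList (updated_valuations.map (fun t => ((t.1, t.2.1), t.2.2)))).items.foldl
      hvStepA PySem.Dict.empty).items

-- ===== PORT B =====
def highest_valuations_alt (updated_valuations : List (String × String × Int)) : List (String × String × Int) :=
  let items := (PySem.Dict.ofList (updated_valuations.map (fun t => ((t.1, t.2.1), t.2.2)))).items
  -- pass 1: groups.setdefault(v, []).append((u, valuation))
  let groups := items.foldl
      (fun (g : PySem.Dict String (List (String × Int))) x =>
        g.modify x.1.2 [] (· ++ [(x.1.1, x.2)])) PySem.Dict.empty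
  -- pass 2: best = pairs[0]; for p in pairs[1:]: if best[1] <= p[1]: best = p
  (groups.items.foldl
      (fun (r : PySem.Dict String (String × Int)) kv =>
        match kv.2 with
        | [] => r   -- unreachable: every group is nonempty
        | b :: rest => r.insert kv.1 (rest.foldl (fun best p => if best.2 ≤ p.2 then p else best) b))
      PySem.Dict.empty).items

-- ===== PRECONDITION & SPEC =====
def Spec_highest_valuations (updated_valuations : List (String × String × Int)) (out : List (String × String × Int)) : Prop := out = highest_valuations_alt updated_valuations
instance (updated_valuations : List (String × String × Int)) (out : List (String × String × Int)) : Decidable (Spec_highest_valuations updated_valuations out) := by unfold Spec_highest_valuations; infer_instance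

-- ===== CLAIM (what is proved, stated in full; the proofs are below) =====
def Claim_equal_highest_valuations : Prop := ∀ (updated_valuations : List (String × String × Int)), Dom_highest_valuations updated_valuations → Spec_highest_valuations updated_valuations (highest_valuations updated_valuations)

-- ===== LEMMAS AND PROOFS =====

-- reduce a nonempty group to its last maximal entry (B's inner loop)
def hvRed : List (String × Int) → String × Int
  | [] => ("", 0)
  | b :: rest => rest.foldl (fun best p => if best.2 ≤ p.2 then p else best) b

-- the per-buyer winner computed from the raw item list
def hvF (items : List ((String × String) × Int)) (v : String) : String × Int :=
  hvRed ((items.filter (fun x => x.1.2 == v)).map (fun x => (x.1.1, x.2)))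

lemma hvRed_append_singleton (ys : List (String × Int)) (q : String × Int) (h : ys ≠ []) :
    hvRed (ys ++ [q]) = if (hvRed ys).2 ≤ q.2 then q else hvRed ys := by
  cases ys with
  | nil => exact absurd rfl h
  | cons b rest => simp [hvRed, List.foldl_append]

lemma hvF_append_of_ne (t : List ((String × String) × Int)) (x : (String × String) × Int)
    (v : String) (h : x.1.2 ≠ v) : hvF (t ++ [x]) v = hvF t v := by
  unfold hvF
  rw [List.filter_append]
  have hb : (x.1.2 == v) = false := by simp [h]
  simp [List.filter, hb]

lemma hvF_filter_ne_nil (t : List ((String × String) × Int)) (v : String)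
    (h : v ∈ t.map (fun x => x.1.2)) :
    (t.filter (fun x => x.1.2 == v)).map (fun x => (x.1.1, x.2)) ≠ [] := by
  obtain ⟨x, hx, hxv⟩ := List.mem_map.mp h
  simp only [ne_eq, List.map_eq_nil_iff, List.filter_eq_nil_iff]
  push Not
  exact ⟨x, hx, by simp [hxv]⟩

lemma hvA_items (items : List ((String × String) × Int)) :
    (items.foldl hvStepA PySem.Dict.empty).items
      = (PySem.Set.ofList (items.map (fun x => x.1.2))).map (fun v => (v, hvF items v)) := by
  induction items using List.reverseRecOn with
  | nil => simp [PySem.Dict.empty, PySem.Set.ofList]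
  | append_singleton t x IH =>
    rw [List.foldl_append, List.foldl_cons, List.foldl_nil]
    simp only [List.map_append, List.map_cons, List.map_nil]
    rw [PySem.Set.ofList_append_singleton]
    set c := t.foldl hvStepA PySem.Dict.empty with hc
    set S := PySem.Set.ofList (t.map (fun x => x.1.2)) with hS
    have hkeys : c.keys = S := by
      simp only [PySem.Dict.keys, IH, List.map_map, Function.comp_def, List.map_id']
    have hnd : c.keys.Nodup := by rw [hkeys]; exact PySem.Set.nodup_ofList _
    by_cases hv : x.1.2 ∈ S
    · -- buyer already present
      have hget : c.get? x.1.2 = some (hvF t x.1.2) := by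
        apply PySem.Dict.get?_of_mem_items _ _ hnd
        rw [IH]
        exact List.mem_map.mpr ⟨x.1.2, hv, rfl⟩
      have hcontains : c.contains x.1.2 = true :=
        (PySem.Dict.contains_iff_mem_keys _ _).mpr (hkeys ▸ hv)
      have hvt : x.1.2 ∈ t.map (fun y => y.1.2) := (PySem.Set.mem_ofList _ _).mp hv
      have hFx : hvF (t ++ [x]) x.1.2
          = if (hvF t x.1.2).2 ≤ x.2 then (x.1.1, x.2) else hvF t x.1.2 := by
        unfold hvF
        rw [List.filter_append]
        simp only [List.filter, beq_self_eq_true, List.map_append, List.map_cons, List.map_nil]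
        rw [hvRed_append_singleton _ _ (hvF_filter_ne_nil t _ hvt)]
      rw [PySem.Set.add_of_mem hv]
      unfold hvStepA
      rw [hget]
      simp only []
      by_cases hle : (hvF t x.1.2).2 ≤ x.2
      · have hbr : (if x.2 > (hvF t x.1.2).2 then c.insert x.1.2 (x.1.1, x.2)
            else if x.2 == (hvF t x.1.2).2 then c.insert x.1.2 (x.1.1, x.2) else c)
            = c.insert x.1.2 (x.1.1, x.2) := by
          rcases lt_or_eq_of_le hle with h | h
          · rw [if_pos h]
          · rw [if_neg (by omega), if_pos (by simp [h.symm])]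
        rw [hbr, PySem.Dict.items_insert_of_contains _ _ hcontains, IH, List.map_map]
        apply List.map_congr_left
        intro v' hv'
        by_cases hveq : v' = x.1.2
        · subst hveq
          simp [hFx, hle]
        · have : (((v', hvF t v') : String × (String × Int)).1 == x.1.2) = false := by
            simp [hveq]
          simp only [Function.comp_def, this, Bool.false_eq_true, if_false]
          rw [hvF_append_of_ne t x v' (fun h => hveq h.symm)]
      · have hbr : (if x.2 > (hvF t x.1.2).2 then c.insert x.1.2 (x.1.1, x.2)
            else if x.2 == (hvF t x.1.2).2 then c.insert x.1.2 (x.1.1, x.2) else c) = c := by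
          rw [if_neg (by omega), if_neg (by simp; omega)]
        rw [hbr, IH]
        apply List.map_congr_left
        intro v' hv'
        by_cases hveq : v' = x.1.2
        · subst hveq
          rw [hFx, if_neg hle]
        · rw [hvF_append_of_ne t x v' (fun h => hveq h.symm)]
    · -- fresh buyer
      have hget : c.get? x.1.2 = none := by
        rw [PySem.Dict.get?_eq_none_iff_not_mem_keys, hkeys]; exact hv
      have hcontains : c.contains x.1.2 = false := by
        have := PySem.Dict.contains_iff_mem_keys c x.1.2
        rw [hkeys] at this
        simp [hv] at this ⊢
        exact this
      have hvt : x.1.2 ∉ t.map (fun y => y.1.2) := fun h => hv ((PySem.Set.mem_ofList _ _).mpr h)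
      rw [PySem.Set.add_of_not_mem hv]
      unfold hvStepA
      rw [hget]
      simp only []
      rw [PySem.Dict.items_insert_of_not_contains _ _ hcontains, IH, List.map_append]
      congr 1
      · apply List.map_congr_left
        intro v' hv'
        have hne : x.1.2 ≠ v' := fun h => hv (h ▸ hv')
        rw [hvF_append_of_ne t x v' hne]
      · simp only [List.map_cons, List.map_nil]
        congr 2
        unfold hvF
        rw [List.filter_append]
        have : t.filter (fun y => y.1.2 == x.1.2) = [] := by
          rw [List.filter_eq_nil_iff]
          intro y hy
          simp only [beq_iff_eq]
          exact fun h => hvt (List.mem_map.mpr ⟨y, hy, h⟩)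
        rw [this]
        simp [List.filter, hvRed]

lemma hvGroups_items (items : List ((String × String) × Int)) :
    (items.foldl
        (fun (g : PySem.Dict String (List (String × Int))) x =>
          g.modify x.1.2 [] (· ++ [(x.1.1, x.2)])) PySem.Dict.empty).items
      = (PySem.Set.ofList (items.map (fun x => x.1.2))).map
          (fun v => (v, (items.filter (fun x => x.1.2 == v)).map (fun x => (x.1.1, x.2)))) := by
  have hkeys : (items.foldl
        (fun (g : PySem.Dict String (List (String × Int))) x =>
          g.modify x.1.2 [] (· ++ [(x.1.1, x.2)])) PySem.Dict.empty).keys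
      = PySem.Set.ofList (items.map (fun x => x.1.2)) := by
    have := PySem.Dict.keys_foldl_modify_key items (fun x => x.1.2) ([] : List (String × Int))
      (fun _ x => (· ++ [(x.1.1, x.2)])) PySem.Dict.empty
    simpa [PySem.Set.update_nil_left] using this
  have hnd : (items.foldl
        (fun (g : PySem.Dict String (List (String × Int))) x =>
          g.modify x.1.2 [] (· ++ [(x.1.1, x.2)])) PySem.Dict.empty).keys.Nodup := by
    rw [hkeys]; exact PySem.Set.nodup_ofList _
  rw [PySem.Dict.items_eq_map_keys _ hnd [], hkeys]
  apply List.map_congr_left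
  intro v hv
  congr 1
  have : items.foldl
        (fun (g : PySem.Dict String (List (String × Int))) x =>
          g.modify x.1.2 [] (· ++ [(x.1.1, x.2)])) PySem.Dict.empty
      = (items.map (fun x => (x.1.2, (x.1.1, x.2)))).foldl
        (fun d p => d.modify p.1 [] (· ++ [p.2])) PySem.Dict.empty := by
    rw [List.foldl_map]
  rw [this, PySem.Dict.getD_foldl_modify_append]
  simp [List.filter_map, List.map_map, Function.comp_def]

lemma hvB_items (items : List ((String × String) × Int)) :
    ((items.foldl
        (fun (g : PySem.Dict String (List (String × Int))) x =>
          g.modify x.1.2 [] (· ++ [(x.1.1, x.2)])) PySem.Dict.empty).items.foldl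
        (fun (r : PySem.Dict String (String × Int)) kv =>
          match kv.2 with
          | [] => r
          | b :: rest => r.insert kv.1 (rest.foldl (fun best p => if best.2 ≤ p.2 then p else best) b))
        PySem.Dict.empty).items
      = (PySem.Set.ofList (items.map (fun x => x.1.2))).map (fun v => (v, hvF items v)) := by
  rw [hvGroups_items, List.foldl_map]
  rw [PySem.List.foldl_congr_mem _ _
    (fun (r : PySem.Dict String (String × Int)) v => r.insert v (hvF items v)) _ ?_]
  · have := PySem.Dict.items_foldl_insert_fresh (PySem.Set.ofList (items.map (fun x => x.1.2)))
      (fun v => v) (fun v => hvF items v) PySem.Dict.empty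
      (by intro a _; simp [PySem.Dict.contains_empty])
      (by simp)
    simpa using this
  · intro acc v hv
    have hvmem : v ∈ items.map (fun x => x.1.2) := (PySem.Set.mem_ofList _ _).mp hv
    obtain ⟨x, hx, hxv⟩ := List.mem_map.mp hvmem
    have hne : (items.filter (fun x => x.1.2 == v)).map (fun x => (x.1.1, x.2)) ≠ [] := by
      simp only [ne_eq, List.map_eq_nil_iff, List.filter_eq_nil_iff]
      push Not
      exact ⟨x, hx, by simp [hxv]⟩
    unfold hvF
    cases h : (items.filter (fun x => x.1.2 == v)).map (fun x => (x.1.1, x.2)) with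
    | nil => exact absurd h hne
    | cons b rest => simp [h, hvRed]

-- ===== VERDICT (by name: the statement is the Claim_ definition above) =====
theorem highest_valuations_spec : Claim_equal_highest_valuations := by
  intro l _
  unfold Spec_highest_valuations highest_valuations highest_valuations_alt
  rw [hvA_items, hvB_items]
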